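-- pv_equiv track=rewrite | github.com/zhaowj1107/VAD_shrink | src/vad_baseline/backends/energy_zcr.py | _apply_hangover
-- ===== SOURCE A (Python) =====
-- def _apply_hangover(decisions, hangover_frames):
--     if hangover_frames <= 0:
--         return decisions[:]
--
--     extended = decisions[:]
--     for frame_index, is_speech in enumerate(decisions):
--         if not is_speech:
--             continue
--         for offset in range(1, hangover_frames + 1):
--             target_index = frame_index + offset
--             if target_index >= len(extended):
--                 break
--             extended[target_index] = True
--     return extended
-- ===== SOURCE B (Python) =====
-- def _apply_hangover(decisions, hangover_frames):
--     if hangover_frames <= 0: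
--         return decisions[:]
--     out = []
--     countdown = 0
--     for is_speech in decisions:
--         if is_speech:
--             countdown = hangover_frames
--             out.append(True)
--         elif countdown > 0:
--             countdown -= 1
--             out.append(True)
--         else:
--             out.append(False)
--     return out
-- ===== Notes on version B (the rewrite author's own statement) =====
-- stated objective: faster
-- what changed: Replaces the nested loop that re-marks up to hangover_frames future frames after every speech frame with a single forward pass carrying a countdown counter reset at each speech frame.
import Mathlib
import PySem

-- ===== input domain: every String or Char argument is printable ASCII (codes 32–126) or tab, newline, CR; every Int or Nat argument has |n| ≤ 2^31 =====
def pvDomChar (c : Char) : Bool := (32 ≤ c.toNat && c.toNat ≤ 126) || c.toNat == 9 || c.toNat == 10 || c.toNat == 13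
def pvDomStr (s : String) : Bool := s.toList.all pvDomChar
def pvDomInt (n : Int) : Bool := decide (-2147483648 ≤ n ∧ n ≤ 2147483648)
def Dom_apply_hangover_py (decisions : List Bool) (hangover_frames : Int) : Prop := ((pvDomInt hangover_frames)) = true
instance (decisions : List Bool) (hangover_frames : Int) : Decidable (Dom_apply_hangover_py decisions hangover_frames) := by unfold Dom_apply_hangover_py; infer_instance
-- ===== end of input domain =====

-- B replaces A's nested re-marking loop (O(n*h)) with a single forward pass
-- carrying a hangover countdown counter (O(n)); same return value everywhere.

-- ===== PORT A =====
-- inner 'for offset in range(1, hangover_frames + 1): … break' loop of A,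
-- transcribed as recursion on the running offset (the lazy range counter)
def innerA (ext : List Bool) (frame_index hang offset : Int) : List Bool :=
  if _h : hang + 1 ≤ offset then ext
  else
    let target := frame_index + offset
    if (ext.length : Int) ≤ target then ext
    else innerA (ext.set target.toNat true) frame_index hang (offset + 1)
termination_by (hang + 1 - offset).toNat
decreasing_by simp_wf; omega

def apply_hangover_py (decisions : List Bool) (hangover_frames : Int) : List Bool :=
  if hangover_frames ≤ 0 then decisions
  else
    (PySem.List.enumerate decisions 0).foldl
      (fun extended p =>
        if !p.2 then extended
        else innerA extended p.1 hangover_frames 1)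
      decisions

-- ===== PORT B =====
-- B's single pass: output list built frame by frame, countdown carried along
def hangGo (hang : Int) : List Bool → Int → List Bool
  | [], _ => []
  | d :: rest, countdown =>
    if d then true :: hangGo hang rest hang
    else if 0 < countdown then true :: hangGo hang rest (countdown - 1)
    else false :: hangGo hang rest 0

def apply_hangover_py_alt (decisions : List Bool) (hangover_frames : Int) : List Bool :=
  if hangover_frames ≤ 0 then decisions
  else hangGo hangover_frames decisions 0

-- ===== PRECONDITION & SPEC =====
def Spec_apply_hangover_py (decisions : List Bool) (hangover_frames : Int) (out : List Bool) : Prop := out = apply_hangover_py_alt decisions hangover_frames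
instance (decisions : List Bool) (hangover_frames : Int) (out : List Bool) : Decidable (Spec_apply_hangover_py decisions hangover_frames out) := by unfold Spec_apply_hangover_py; infer_instance

-- ===== CLAIM (what is proved, stated in full; the proofs are below) =====
def Claim_equal_apply_hangover_py : Prop := ∀ (decisions : List Bool) (hangover_frames : Int), Dom_apply_hangover_py decisions hangover_frames → Spec_apply_hangover_py decisions hangover_frames (apply_hangover_py decisions hangover_frames)

-- ===== LEMMAS AND PROOFS =====

theorem innerA_length (ext : List Bool) (fi hang o : Int) :
    (innerA ext fi hang o).length = ext.length := by
  fun_induction innerA ext fi hang o with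
  | case1 => rfl
  | case2 => rfl
  | case3 ext fi hang o h1 ih => simpa using ih

theorem getD_set_ite (l : List Bool) (i j : Nat) (h : i < l.length) :
    (l.set i true).getD j false = if i = j then true else l.getD j false := by
  simp [List.getD_eq_getElem?_getD, List.getElem?_set, h]
  split <;> simp_all

theorem innerA_getD (fi hang : Int) (j : Nat) (hfi : 0 ≤ fi) :
    ∀ (n : Nat) (o : Int) (ext : List Bool), (hang + 1 - o).toNat = n → 1 ≤ o → j < ext.length →
    ((innerA ext fi hang o).getD j false = true ↔
      ext.getD j false = true ∨ (fi + o ≤ (j : Int) ∧ (j : Int) ≤ fi + hang)) := by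
  intro n
  induction n with
  | zero =>
    intro o ext hn ho hj
    rw [innerA, dif_pos (by omega : hang + 1 ≤ o)]
    constructor
    · exact Or.inl
    · rintro (h | ⟨h1, h2⟩)
      · exact h
      · omega
  | succ n ih =>
    intro o ext hn ho hj
    rw [innerA, dif_neg (by omega : ¬ hang + 1 ≤ o)]
    simp only
    by_cases hlen : (ext.length : Int) ≤ fi + o
    · rw [if_pos hlen]
      constructor
      · exact Or.inl
      · rintro (h | ⟨h1, h2⟩)
        · exact h
        · omega
    · rw [if_neg hlen]
      have hset : ((fi + o).toNat : Int) = fi + o := by omega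
      have htlt : (fi + o).toNat < ext.length := by omega
      rw [ih (o + 1) (ext.set (fi + o).toNat true) (by omega) (by omega) (by simpa using hj)]
      rw [getD_set_ite ext _ j htlt]
      by_cases hjt : (fi + o).toNat = j
      · rw [if_pos hjt]
        constructor
        · intro _; exact Or.inr ⟨by omega, by omega⟩
        · intro _; exact Or.inl rfl
      · rw [if_neg hjt]
        constructor
        · rintro (h | ⟨h1, h2⟩)
          · exact Or.inl h
          · exact Or.inr ⟨by omega, h2⟩
        · rintro (h | ⟨h1, h2⟩)
          · exact Or.inl h
          · exact Or.inr ⟨by omega, h2⟩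

theorem foldA_length (hang : Int) (pairs : List (Int × Bool)) :
    ∀ ext : List Bool,
    (pairs.foldl (fun extended p => if !p.2 then extended else innerA extended p.1 hang 1) ext).length
      = ext.length := by
  induction pairs with
  | nil => intro ext; rfl
  | cons p rest ih =>
    intro ext
    simp only [List.foldl_cons]
    rw [ih]
    by_cases hd : p.2 <;> simp [hd, innerA_length]

theorem foldA_getD (hang : Int) (j : Nat) (pairs : List (Int × Bool)) :
    ∀ ext : List Bool, (∀ p ∈ pairs, 0 ≤ p.1) → j < ext.length →
    ((pairs.foldl (fun extended p => if !p.2 then extended else innerA extended p.1 hang 1) ext).getD j false = true ↔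
      ext.getD j false = true ∨
        ∃ p ∈ pairs, p.2 = true ∧ p.1 + 1 ≤ (j : Int) ∧ (j : Int) ≤ p.1 + hang) := by
  induction pairs with
  | nil => intro ext _ hj; simp
  | cons p rest ih =>
    intro ext hpos hj
    simp only [List.foldl_cons]
    by_cases hd : p.2
    · have h0 : (0:Int) ≤ p.1 := hpos p (by simp)
      rw [if_neg (by simp [hd])]
      rw [ih (innerA ext p.1 hang 1) (fun q hq => hpos q (by simp [hq])) (by rw [innerA_length]; exact hj)]
      rw [innerA_getD p.1 hang j h0 ((hang + 1 - 1).toNat) 1 ext rfl (by omega) hj]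
      constructor
      · rintro ((h | ⟨h1, h2⟩) | ⟨q, hq, hq2⟩)
        · exact Or.inl h
        · exact Or.inr ⟨p, by simp, hd, by omega, by omega⟩
        · exact Or.inr ⟨q, by simp [hq], hq2⟩
      · rintro (h | ⟨q, hq, hq2⟩)
        · exact Or.inl (Or.inl h)
        · rcases List.mem_cons.mp hq with hq | hq
          · subst hq; exact Or.inl (Or.inr ⟨by omega, by omega⟩)
          · exact Or.inr ⟨q, hq, hq2⟩
    · rw [if_pos (by simp [hd])]
      rw [ih ext (fun q hq => hpos q (by simp [hq])) hj]
      constructor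
      · rintro (h | ⟨q, hq, hq2⟩)
        · exact Or.inl h
        · exact Or.inr ⟨q, by simp [hq], hq2⟩
      · rintro (h | ⟨q, hq, hq2⟩)
        · exact Or.inl h
        · rcases List.mem_cons.mp hq with hq | hq
          · subst hq; exact absurd hq2.1 hd
          · exact Or.inr ⟨q, hq, hq2⟩

theorem exists_lt_succ_iff {n : Nat} {P : Nat → Prop} :
    (∃ k, k < n + 1 ∧ P k) ↔ (P 0 ∨ ∃ k, k < n ∧ P (k + 1)) := by
  constructor
  · rintro ⟨k, hk, hp⟩
    cases k with
    | zero => exact Or.inl hp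
    | succ k => exact Or.inr ⟨k, by omega, hp⟩
  · rintro (h | ⟨k, hk, hp⟩)
    · exact ⟨0, by omega, h⟩
    · exact ⟨k + 1, by omega, hp⟩

theorem hangGo_getD (hang : Int) (h1 : 1 ≤ hang) :
    ∀ (l : List Bool) (cd : Int) (j : Nat), 0 ≤ cd → cd ≤ hang → j < l.length →
    ((hangGo hang l cd).getD j false = true ↔
      (j : Int) < cd ∨
        ∃ k, k < l.length ∧ l.getD k false = true ∧ (k : Int) ≤ (j : Int) ∧ (j : Int) ≤ (k : Int) + hang) := by
  intro l
  induction l with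
  | nil => intro cd j _ _ hj; simp at hj
  | cons d rest ih =>
    intro cd j hcd0 hcdh hj
    simp only [List.length_cons]
    rw [exists_lt_succ_iff]
    cases j with
    | zero =>
      have hnx : ¬ ∃ k, k < rest.length ∧ ((d :: rest).getD (k+1) false = true ∧
          ((k+1 : Nat) : Int) ≤ ((0 : Nat) : Int) ∧ ((0 : Nat) : Int) ≤ ((k+1 : Nat) : Int) + hang) := by
        rintro ⟨k, _, _, hk, _⟩; omega
      by_cases hd : d
      · simp only [hangGo, hd, if_true]
        simp only [List.getD_cons_zero]
        constructor
        · intro _; exact Or.inr (Or.inl ⟨by simp, by omega, by omega⟩)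
        · intro _; trivial
      · simp only [hangGo, hd, if_false, Bool.false_eq_true]
        by_cases hcd : 0 < cd
        · rw [if_pos hcd]
          simp only [List.getD_cons_zero]
          constructor
          · intro _; exact Or.inl (by omega)
          · intro _; trivial
        · rw [if_neg hcd]
          simp only [List.getD_cons_zero]
          constructor
          · intro h; exact absurd h (by simp)
          · rintro (h | (⟨hg, _⟩ | hx))
            · omega
            · exact absurd hg (by simp_all)
            · exact absurd hx hnx
    | succ j =>
      have hrest : j < rest.length := by simpa using hj
      have hEx : (∃ k, k < rest.length ∧ ((d :: rest).getD (k+1) false = true ∧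
            ((k+1 : Nat) : Int) ≤ ((j+1 : Nat) : Int) ∧ ((j+1 : Nat) : Int) ≤ ((k+1 : Nat) : Int) + hang)) ↔
          (∃ k, k < rest.length ∧ rest.getD k false = true ∧ (k : Int) ≤ (j : Int) ∧ (j : Int) ≤ (k : Int) + hang) := by
        apply exists_congr; intro k
        constructor
        · rintro ⟨hk, hg, ha, hb⟩
          exact ⟨hk, by simpa using hg, by omega, by omega⟩
        · rintro ⟨hk, hg, ha, hb⟩
          exact ⟨hk, by rw [List.getD_eq_getElem?_getD] at hg; exact hg, by omega, by omega⟩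
      rw [hEx]
      by_cases hd : d
      · simp only [hangGo, hd, if_true, List.getD_cons_succ]
        rw [ih hang j (by omega) le_rfl hrest]
        constructor
        · rintro (h | h)
          · exact Or.inr (Or.inl ⟨by simp, by omega, by omega⟩)
          · exact Or.inr (Or.inr h)
        · rintro (h | (⟨_, _, hb⟩ | h))
          · left; omega
          · left; omega
          · right; exact h
      · simp only [hangGo, hd, if_false, Bool.false_eq_true]
        by_cases hcd : 0 < cd
        · rw [if_pos hcd]
          simp only [List.getD_cons_succ]
          rw [ih (cd - 1) j (by omega) (by omega) hrest]
          constructor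
          · rintro (h | h)
            · left; omega
            · exact Or.inr (Or.inr h)
          · rintro (h | (⟨hg, _⟩ | h))
            · left; omega
            · exact absurd hg (by simp_all)
            · right; exact h
        · rw [if_neg hcd]
          simp only [List.getD_cons_succ]
          rw [ih 0 j le_rfl (by omega) hrest]
          constructor
          · rintro (h | h)
            · omega
            · exact Or.inr (Or.inr h)
          · rintro (h | (⟨hg, _⟩ | h))
            · omega
            · exact absurd hg (by simp_all)
            · right; exact h

theorem hangGo_length (hang : Int) (l : List Bool) : ∀ cd, (hangGo hang l cd).length = l.length := by
  induction l with
  | nil => intro cd; rfl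
  | cons d rest ih =>
    intro cd
    by_cases hd : d <;> simp only [hangGo, hd, if_true, if_false, Bool.false_eq_true] <;> (try split) <;> simp [ih]

-- ===== VERDICT (by name: the statement is the Claim_ definition above) =====
theorem apply_hangover_py_spec : Claim_equal_apply_hangover_py := by
  intro l h _
  show apply_hangover_py l h = apply_hangover_py_alt l h
  by_cases hh : h ≤ 0
  · simp [apply_hangover_py, apply_hangover_py_alt, hh]
  · have h1 : (1:Int) ≤ h := by omega
    unfold apply_hangover_py apply_hangover_py_alt
    rw [if_neg hh, if_neg hh]
    have hlenA := foldA_length h (PySem.List.enumerate l 0) l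
    have hlenB := hangGo_length h l 0
    apply List.ext_getElem (by rw [hlenA, hlenB])
    intro i hiA hiB
    have hi : i < l.length := hlenA ▸ hiA
    have hgd : ∀ (xs : List Bool) (h2 : i < xs.length), xs[i] = xs.getD i false :=
      fun xs h2 => (List.getD_eq_getElem xs false h2).symm
    rw [hgd _ hiA, hgd _ hiB]
    have hpos : ∀ p ∈ PySem.List.enumerate l 0, (0:Int) ≤ p.1 := by
      intro p hp
      obtain ⟨k, hk, rfl⟩ := (PySem.List.mem_enumerate_iff _ _ _).mp hp
      simp
    rw [Bool.eq_iff_iff]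
    rw [foldA_getD h i (PySem.List.enumerate l 0) l hpos hi]
    rw [hangGo_getD h h1 l 0 i le_rfl (by omega) hi]
    constructor
    · rintro (hg | ⟨p, hp, hps, ha, hb⟩)
      · exact Or.inr ⟨i, hi, hg, le_rfl, by omega⟩
      · obtain ⟨k, hk, rfl⟩ := (PySem.List.mem_enumerate_iff _ _ _).mp hp
        simp only at hps ha hb
        refine Or.inr ⟨k, hk, ?_, by omega, by omega⟩
        rw [List.getD_eq_getElem l false hk]
        exact hps
    · rintro (hneg | ⟨k, hk, hg, ha, hb⟩)
      · omega
      · by_cases hik : k = i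
        · subst hik; exact Or.inl hg
        · refine Or.inr ⟨((0:Int) + k, l[k]), (PySem.List.mem_enumerate_iff _ _ _).mpr ⟨k, hk, rfl⟩, ?_, by simp; omega, by simp; omega⟩
          rw [← List.getD_eq_getElem l false hk]
          exact hg
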